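-- pv_equiv track=rewrite | github.com/juan15377/TimeTables | src/models/database/components/export_functions/components/grid_formats/schedulegrid.py | split_vector_into_blocks
-- ===== SOURCE A (Python) =====
-- from typing import List
--
-- def split_vector_into_blocks(vector: List[bool]) -> List[List[int]]:
--     """
--     Splits a boolean vector into blocks of consecutive True values.
--
--     This function identifies sequences of consecutive True values in the input vector
--     and returns a list of blocks, where each block contains the indices (1-based) of
--     the True values in the sequence.
--
--     Args:
--         vector: A list of boolean values (True or False).
--
--     Returns:
--         A list of blocks, where each block is a list of indices (1-based) of consecutive True values.
--
--     Example:
--         >>> split_vector_into_blocks([True, True, False, True, False, True, True])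
--         [[1, 2], [4], [6, 7]]
--     """
--     blocks = []  # Stores the final list of blocks
--     current_block = []  # Temporarily stores indices of the current block
--     in_block = False  # Flag to track if we are inside a block of True values
--
--     for index, value in enumerate(vector):
--         if value:
--             # If the value is True, add its 1-based index to the current block
--             current_block.append(index + 1)
--             in_block = True
--             continue
--
--         if in_block:
--             # If we were in a block and encounter a False, finalize the current block
--             blocks.append(current_block)
--             current_block = []  # Reset the current block
--             in_block = False  # Reset the flag
--
--     # If there's an unfinished block at the end, add it to the list of blocks
--     if current_block:
--         blocks.append(current_block)
--
--     return blocks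
-- ===== SOURCE B (Python) =====
-- from typing import List
--
-- def split_vector_into_blocks(vector: List[bool]) -> List[List[int]]:
--     # Build the result back-to-front: walk indices from the end; a True index
--     # merges into the head block iff that block starts at the adjacent index.
--     blocks: List[List[int]] = []
--     for index in range(len(vector) - 1, -1, -1):
--         if vector[index]:
--             if blocks and blocks[0][0] == index + 2:
--                 blocks[0].insert(0, index + 1)
--             else:
--                 blocks.insert(0, [index + 1])
--     return blocks
-- ===== Notes on version B (the rewrite author's own statement) =====
-- stated objective: alternative
-- what changed: Replaced A's forward flag/current-block flush state machine with a back-to-front construction: iterate indices from the end and either merge a True index into the head block (when that block starts at the adjacent index) or prepend a new singleton block; no flag or pending buffer is kept.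
import Mathlib
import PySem

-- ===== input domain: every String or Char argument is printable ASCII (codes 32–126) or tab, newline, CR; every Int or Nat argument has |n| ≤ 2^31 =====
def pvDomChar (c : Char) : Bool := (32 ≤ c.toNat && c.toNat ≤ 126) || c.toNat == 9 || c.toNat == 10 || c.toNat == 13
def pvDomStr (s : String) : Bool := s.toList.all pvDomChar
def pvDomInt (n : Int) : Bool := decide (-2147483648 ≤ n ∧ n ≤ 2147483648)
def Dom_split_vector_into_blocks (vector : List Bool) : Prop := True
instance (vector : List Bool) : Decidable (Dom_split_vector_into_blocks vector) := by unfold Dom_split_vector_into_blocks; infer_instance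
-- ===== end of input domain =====

-- B builds the block list back-to-front (merge a True index into the head block when adjacent,
-- else prepend a singleton) instead of A's forward flag/flush state machine; objective: alternative.


-- ===== PORT A =====
-- loop body: state = (blocks, current_block, in_block)
def pvStepA (s : List (List Int) × List Int × Bool) (p : Int × Bool) :
    List (List Int) × List Int × Bool :=
  if p.2 then (s.1, s.2.1 ++ [p.1 + 1], true)
  else if s.2.2 then (s.1 ++ [s.2.1], [], false)
  else s

def split_vector_into_blocks (vector : List Bool) : List (List Int) :=
  let st := (PySem.List.enumerate vector).foldl pvStepA ([], [], false)
  if st.2.1 ≠ [] then st.1 ++ [st.2.1] else st.1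

-- ===== PORT B =====
-- Source B's descending-index loop: the suffix's blocks are built first, then the current
-- index is processed (merge into the head block iff it starts at the adjacent index,
-- i.e. blocks[0][0] == index + 2); s is the 0-based index of the list head.
def pvGoB (s : Int) : List Bool → List (List Int)
  | [] => []
  | b :: rest =>
    let blocks := pvGoB (s + 1) rest
    if b then
      match blocks with
      | (j :: blk) :: more =>
        if j = s + 2 then ((s + 1) :: j :: blk) :: more else [s + 1] :: blocks
      | _ => [s + 1] :: blocks
    else blocks

def split_vector_into_blocks_alt (vector : List Bool) : List (List Int) :=
  pvGoB 0 vector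

-- ===== PRECONDITION & SPEC =====
def Spec_split_vector_into_blocks (vector : List Bool) (out : List (List Int)) : Prop := out = split_vector_into_blocks_alt vector
instance (vector : List Bool) (out : List (List Int)) : Decidable (Spec_split_vector_into_blocks vector out) := by unfold Spec_split_vector_into_blocks; infer_instance

-- ===== CLAIM (what is proved, stated in full; the proofs are below) =====
def Claim_equal_split_vector_into_blocks : Prop := ∀ (vector : List Bool), Dom_split_vector_into_blocks vector → Spec_split_vector_into_blocks vector (split_vector_into_blocks vector)

-- ===== LEMMAS AND PROOFS =====

def pvFlush (cur : List Int) : List (List Int) := if cur = [] then [] else [cur]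

-- right-recursive characterisation of A's loop: flush the pending block on False / at the end
def pvResume (cur : List Int) : List (Int × Bool) → List (List Int)
  | [] => pvFlush cur
  | (i, true) :: rest => pvResume (cur ++ [i + 1]) rest
  | (_, false) :: rest => pvFlush cur ++ pvResume [] rest

-- A's fold, started in a state whose flag agrees with "current block nonempty", computes pvResume
theorem pvFoldA_eq_resume (l : List (Int × Bool)) :
    ∀ (blocks : List (List Int)) (cur : List Int),
      (let st := l.foldl pvStepA (blocks, cur, !cur.isEmpty)
       if st.2.1 ≠ [] then st.1 ++ [st.2.1] else st.1) = blocks ++ pvResume cur l := by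
  induction l with
  | nil =>
    intro blocks cur
    simp only [List.foldl_nil, pvResume, pvFlush]
    by_cases h : cur = [] <;> simp [h]
  | cons p rest ih =>
    intro blocks cur
    obtain ⟨i, b⟩ := p
    cases b with
    | true =>
      have : pvStepA (blocks, cur, !cur.isEmpty) (i, true) = (blocks, cur ++ [i + 1], true) := by
        simp [pvStepA]
      simp only [List.foldl_cons, this, pvResume]
      have h2 : (true : Bool) = !(cur ++ [i + 1]).isEmpty := by simp
      rw [h2]; exact ih blocks (cur ++ [i + 1])
    | false =>
      by_cases hc : cur = []
      · subst hc
        have : pvStepA (blocks, [], !([] : List Int).isEmpty) (i, false)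
             = (blocks, [], !([] : List Int).isEmpty) := by simp [pvStepA]
        simp only [List.foldl_cons, this, pvResume, pvFlush]
        simpa using ih blocks []
      · have : pvStepA (blocks, cur, !cur.isEmpty) (i, false)
             = (blocks ++ [cur], [], false) := by
          simp [pvStepA, hc]
        simp only [List.foldl_cons, this, pvResume, pvFlush]
        have h2 : (false : Bool) = !([] : List Int).isEmpty := by simp
        rw [h2]
        rw [ih (blocks ++ [cur]) []]
        simp [hc]

-- every block B builds is nonempty
theorem pvGoB_blocks_ne_nil (v : List Bool) :
    ∀ (s : Int), ∀ b ∈ pvGoB s v, b ≠ [] := by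
  induction v with
  | nil => intro s b hb; simp [pvGoB] at hb
  | cons x rest ih =>
    intro s b hb
    simp only [pvGoB] at hb
    cases x with
    | false => exact ih (s + 1) b hb
    | true =>
      rcases hgo : pvGoB (s + 1) rest with _ | ⟨hd, more⟩
      · rw [hgo] at hb; simp at hb; simp [hb]
      · rcases hd with _ | ⟨j, blk⟩
        · rw [hgo] at hb; simp only [if_true] at hb
          rcases List.mem_cons.mp hb with h | h
          · simp [h]
          · exact ih (s + 1) b (by rw [hgo]; exact h)
        · rw [hgo] at hb; simp only [if_true] at hb
          by_cases hj : j = s + 2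
          · rw [if_pos hj] at hb
            rcases List.mem_cons.mp hb with h | h
            · simp [h]
            · exact ih (s + 1) b (by rw [hgo]; exact List.mem_cons_of_mem _ h)
          · rw [if_neg hj] at hb
            rcases List.mem_cons.mp hb with h | h
            · simp [h]
            · exact ih (s + 1) b (by rw [hgo]; exact h)

-- the head block B builds starts at index ≥ s + 1
theorem pvGoB_head_ge (v : List Bool) :
    ∀ (s j : Int) (blk : List Int) (more : List (List Int)),
      pvGoB s v = (j :: blk) :: more → s + 1 ≤ j := by
  induction v with
  | nil => intro s j blk more h; simp [pvGoB] at h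
  | cons x rest ih =>
    intro s j blk more h
    simp only [pvGoB] at h
    cases x with
    | false =>
      have := ih (s + 1) j blk more h
      omega
    | true =>
      rcases hgo : pvGoB (s + 1) rest with _ | ⟨hd, m2⟩
      · rw [hgo] at h; simp at h; omega
      · rcases hd with _ | ⟨j2, blk2⟩
        · rw [hgo] at h; simp at h; omega
        · rw [hgo] at h; simp only [if_true] at h
          by_cases hj : j2 = s + 2
          · rw [if_pos hj] at h
            have h1 : s + 1 = j := (List.cons.injEq _ _ _ _).mp ((List.cons.injEq _ _ _ _).mp h).1 |>.1
            omega
          · rw [if_neg hj] at h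
            have h1 : s + 1 = j := (List.cons.injEq _ _ _ _).mp ((List.cons.injEq _ _ _ _).mp h).1 |>.1
            omega

-- how a pending block cur is absorbed into the back-to-front result: it joins the head
-- block when that block starts right after cur, otherwise it is flushed in front
def pvMerge (cur : List Int) (s : Int) (blks : List (List Int)) : List (List Int) :=
  match blks with
  | (j :: blk) :: more => if j = s + 1 then (cur ++ j :: blk) :: more else pvFlush cur ++ blks
  | _ => pvFlush cur ++ blks

theorem pvMerge_nil_cur (s : Int) (blks : List (List Int)) : pvMerge [] s blks = blks := by
  unfold pvMerge
  rcases blks with _ | ⟨hd, more⟩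
  · simp [pvFlush]
  · rcases hd with _ | ⟨j, blk⟩
    · simp [pvFlush]
    · by_cases hj : j = s + 1 <;> simp [hj, pvFlush]

-- core invariant: A's resume from state cur over the enumeration from s equals
-- merging cur into B's back-to-front result for the same suffix
theorem pvResume_eq_merge (v : List Bool) :
    ∀ (s : Int) (cur : List Int),
      pvResume cur (PySem.List.enumerate v s) = pvMerge cur s (pvGoB s v) := by
  induction v with
  | nil =>
    intro s cur
    simp [PySem.List.enumerate_nil, pvResume, pvGoB, pvMerge]
  | cons x rest ih =>
    intro s cur
    rw [PySem.List.enumerate_cons]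
    cases x with
    | true =>
      simp only [pvResume]
      rw [ih (s + 1) (cur ++ [s + 1])]
      simp only [pvGoB]
      rcases hgo : pvGoB (s + 1) rest with _ | ⟨hd, more⟩
      · simp [pvMerge, pvFlush]
      · rcases hd with _ | ⟨j, blk⟩
        · exact absurd rfl (pvGoB_blocks_ne_nil rest (s + 1) [] (by rw [hgo]; simp))
        · by_cases hj : j = s + 2
          · simp only [if_true, hj, pvMerge]
            have : s + 2 = s + 1 + 1 := by ring
            simp [this]
          · have hj2 : ¬ (j = s + 1 + 1) := by omega
            simp only [if_true, if_neg hj, pvMerge, if_neg hj2, pvFlush]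
            have hne : cur ++ [s + 1] ≠ [] := by simp
            simp [hne]
    | false =>
      simp only [pvResume]
      rw [ih (s + 1) [], pvMerge_nil_cur]
      simp only [pvGoB, if_neg (by simp : ¬ (false = true))]
      unfold pvMerge
      rcases hgo : pvGoB (s + 1) rest with _ | ⟨hd, more⟩
      · rfl
      · rcases hd with _ | ⟨j, blk⟩
        · rfl
        · have := pvGoB_head_ge rest (s + 1) j blk more hgo
          have hj : ¬ (j = s + 1) := by omega
          simp [hj]

-- ===== VERDICT (by name: the statement is the Claim_ definition above) =====
theorem split_vector_into_blocks_spec : Claim_equal_split_vector_into_blocks := by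
  intro vector _
  unfold Spec_split_vector_into_blocks split_vector_into_blocks split_vector_into_blocks_alt
  have h := pvFoldA_eq_resume (PySem.List.enumerate vector) [] []
  simp only [List.isEmpty_nil, Bool.not_true] at h
  rw [h]
  rw [show PySem.List.enumerate vector = PySem.List.enumerate vector 0 from rfl,
      pvResume_eq_merge vector 0 [], pvMerge_nil_cur]
  simp
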